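-- pv_equiv track=rewrite | github.com/toni-the-dude/LeetCode | 2373-largest-local-values-in-a-matrix/2373-largest-local-values-in-a-matrix.py | largestLocal
-- ===== SOURCE A (Python) =====
-- from typing import List
--
-- def largestLocal(grid: List[List[int]]) -> List[List[int]]:
--
--     n = len(grid)
--     output = [[0] * (n - 2) for _ in range(n - 2)]
--
--     for i in range(1, n - 1, 1):
--         for j in range(1, n - 1, 1):
--             output[i - 1][j - 1] = max(
--                 grid[i - 1][j - 1], grid[i - 1][j], grid[i - 1][j + 1],
--                 grid[i][j - 1],     grid[i][j],     grid[i][j + 1],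
--                 grid[i + 1][j - 1], grid[i + 1][j], grid[i + 1][j + 1]
--             )
--
--     return output
-- ===== SOURCE B (Python) =====
-- from typing import List
--
-- def largestLocal(grid: List[List[int]]) -> List[List[int]]:
--     n = len(grid)
--     rowmax = [[max(row[j], row[j + 1], row[j + 2]) for j in range(n - 2)]
--               for row in grid]
--     return [[max(rowmax[i][j], rowmax[i + 1][j], rowmax[i + 2][j])
--              for j in range(n - 2)]
--             for i in range(n - 2)]
-- ===== Notes on version B (the rewrite author's own statement) =====
-- stated objective: alternative
-- what changed: Replaces the single pass taking a 9-way max per window with a separable two-pass max: an intermediate table of horizontal 1x3 row maxima followed by a vertical 3-way max over that table.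
import Mathlib
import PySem

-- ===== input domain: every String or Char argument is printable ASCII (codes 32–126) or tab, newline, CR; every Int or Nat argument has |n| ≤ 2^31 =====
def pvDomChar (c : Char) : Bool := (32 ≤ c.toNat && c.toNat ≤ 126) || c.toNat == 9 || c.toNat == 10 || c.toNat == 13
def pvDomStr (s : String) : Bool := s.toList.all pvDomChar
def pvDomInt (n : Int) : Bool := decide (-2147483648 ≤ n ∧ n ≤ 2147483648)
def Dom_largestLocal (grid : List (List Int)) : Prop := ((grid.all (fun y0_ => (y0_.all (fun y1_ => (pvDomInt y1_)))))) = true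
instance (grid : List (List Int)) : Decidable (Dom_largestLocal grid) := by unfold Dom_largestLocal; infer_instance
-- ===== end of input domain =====

-- B replaces A's 9-way max per window by a separable two-pass max: a table of horizontal 1x3 row maxima, then a vertical 3-way max over it.

-- ===== PORT A =====
-- grid[r][c]: indices are always non-negative here; they are in range under Pre_ (Python raises IndexError otherwise).
def pvAt (grid : List (List Int)) (r c : Nat) : Int := (grid.getD r []).getD c 0

def largestLocal (grid : List (List Int)) : List (List Int) :=
  let n := grid.length
  let output := List.replicate (n - 2) (List.replicate (n - 2) (0 : Int))
  (List.range' 1 (n - 2)).foldl (fun out i =>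
    (List.range' 1 (n - 2)).foldl (fun out j =>
      out.set (i - 1) ((out.getD (i - 1) []).set (j - 1)
        (max (max (max (max (max (max (max (max
          (pvAt grid (i-1) (j-1)) (pvAt grid (i-1) j)) (pvAt grid (i-1) (j+1)))
          (pvAt grid i (j-1))) (pvAt grid i j)) (pvAt grid i (j+1)))
          (pvAt grid (i+1) (j-1))) (pvAt grid (i+1) j)) (pvAt grid (i+1) (j+1))))) out) output

-- ===== PORT B =====
def largestLocal_alt (grid : List (List Int)) : List (List Int) :=
  let n := grid.length
  let rowmax := grid.map (fun row =>
    (List.range (n - 2)).map (fun j =>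
      max (max (row.getD j 0) (row.getD (j+1) 0)) (row.getD (j+2) 0)))
  (List.range (n - 2)).map (fun i =>
    (List.range (n - 2)).map (fun j =>
      max (max ((rowmax.getD i []).getD j 0) ((rowmax.getD (i+1) []).getD j 0))
        ((rowmax.getD (i+2) []).getD j 0)))

-- ===== PRECONDITION & SPEC =====
-- Exactly where Python A returns: for n ≥ 3 it reads columns 0..n-1 of every row
-- (IndexError on a row shorter than n); for n ≤ 2 it returns [] without reading anything.
def Pre_largestLocal (grid : List (List Int)) : Prop :=
  grid.length ≤ 2 ∨ ∀ r ∈ grid, grid.length ≤ r.length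
instance (grid : List (List Int)) : Decidable (Pre_largestLocal grid) := by
  unfold Pre_largestLocal; infer_instance

def pvWitness_largestLocal : List (List Int) := [[9,1,2],[3,4,5],[6,7,8]]

def Spec_largestLocal (grid : List (List Int)) (out : List (List Int)) : Prop := out = largestLocal_alt grid
instance (grid : List (List Int)) (out : List (List Int)) : Decidable (Spec_largestLocal grid out) := by unfold Spec_largestLocal; infer_instance

-- ===== CLAIM (what is proved, stated in full; the proofs are below) =====
def Claim_equal_largestLocal : Prop := ∀ (grid : List (List Int)), Dom_largestLocal grid → Pre_largestLocal grid → Spec_largestLocal grid (largestLocal grid)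

-- ===== LEMMAS AND PROOFS =====

-- the window maximum both sides compute at output cell (i, j)
def pvW (grid : List (List Int)) (i j : Nat) : Int :=
  max (max (max (max (max (max (max (max
    (pvAt grid i j) (pvAt grid i (j+1))) (pvAt grid i (j+2)))
    (pvAt grid (i+1) j)) (pvAt grid (i+1) (j+1))) (pvAt grid (i+1) (j+2)))
    (pvAt grid (i+2) j)) (pvAt grid (i+2) (j+1))) (pvAt grid (i+2) (j+2))

-- folding "set k (w k)" over range m fills the first m entries in order
theorem foldl_range_set' {α : Type} (w : Nat → α) :
    ∀ (m : Nat) (r0 : List α), m ≤ r0.length →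
      (List.range m).foldl (fun r k => r.set k (w k)) r0
        = ((List.range m).map w) ++ r0.drop m := by
  intro m
  induction m with
  | zero => intro r0 _; simp
  | succ m ih =>
    intro r0 hm
    have hm' : m < r0.length := by omega
    rw [List.range_succ, List.foldl_append, List.map_append, ih r0 (by omega)]
    have hlen : ((List.range m).map w).length = m := by simp
    have hdrop : r0.drop m = r0[m] :: r0.drop (m+1) := List.drop_eq_getElem_cons hm'
    simp only [List.foldl_cons, List.foldl_nil]
    rw [hdrop, List.set_append_right _ _ (by omega), hlen]
    simp only [Nat.sub_self, List.set_cons_zero, List.map_cons, List.map_nil, List.append_assoc,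
      List.cons_append, List.nil_append]

-- a fold that repeatedly rewrites row p collapses to a single set of row p
theorem inner_set_collapse (p : Nat) (idx : Nat → Nat) (v : Nat → Int) :
    ∀ (L : List Nat) (out : List (List Int)), p < out.length →
      L.foldl (fun o j => o.set p ((o.getD p []).set (idx j) (v j))) out
        = out.set p (L.foldl (fun r j => r.set (idx j) (v j)) (out.getD p [])) := by
  intro L
  induction L with
  | nil =>
    intro out hp
    simp [List.getD, List.getElem?_eq_getElem hp, List.set_getElem_self]
  | cons j L ih =>
    intro out hp
    simp only [List.foldl_cons]
    rw [ih _ (by simpa using hp)]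
    have hg : (out.set p ((out.getD p []).set (idx j) (v j))).getD p []
        = (out.getD p []).set (idx j) (v j) := by
      rw [List.getD_eq_getElem _ _ (by simpa using hp)]
      simp
    rw [hg, List.set_set]

-- fold congruence under an invariant preserved by the replacement step
theorem foldl_congr_inv {α β : Type} (P : α → Prop) (f f' : α → β → α) :
    ∀ (L : List β) (out : α), (∀ o k, P o → k ∈ L → f o k = f' o k) →
      (∀ o k, P o → P (f' o k)) → P out → L.foldl f out = L.foldl f' out := by
  intro L
  induction L with
  | nil => intro out _ _ _; rfl
  | cons k L ih =>
    intro out h hp hP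
    simp only [List.foldl_cons]
    rw [h out k hP (List.mem_cons_self)]
    exact ih _ (fun o k' hP' hk' => h o k' hP' (List.mem_cons_of_mem _ hk')) hp (hp out k hP)

theorem A_char (grid : List (List Int)) :
    largestLocal grid
      = (List.range (grid.length - 2)).map (fun i =>
          (List.range (grid.length - 2)).map (fun j => pvW grid i j)) := by
  unfold largestLocal
  set n := grid.length with hn
  set m := n - 2 with hm
  set out0 := List.replicate m (List.replicate m (0 : Int)) with hout0
  have hP0 : out0.length = m ∧ ∀ r ∈ out0, r.length = m := by
    constructor
    · simp [hout0]
    · intro r hr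
      rw [List.eq_of_mem_replicate hr]
      simp
  rw [foldl_congr_inv (fun o => o.length = m ∧ ∀ r ∈ o, r.length = m) _
    (fun out i => out.set (i-1) ((List.range m).map (fun t => pvW grid (i-1) t)))
    (List.range' 1 m) out0 ?_ ?_ hP0]
  · -- outer fold of the simplified step fills the rows in order
    rw [List.range'_eq_map_range, List.foldl_map]
    simp only [Nat.add_sub_cancel_left]
    rw [foldl_range_set' _ m out0 (by simp [hout0])]
    simp [hout0]
  · -- the actual step equals the simplified step on states satisfying the invariant
    intro o i hPo hi
    obtain ⟨hlen, hrows⟩ := hPo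
    have hi' : 1 ≤ i ∧ i < 1 + m := by
      rw [List.mem_range'] at hi; omega
    have hplt : i - 1 < o.length := by omega
    rw [inner_set_collapse (i-1) (fun j => j - 1) _ _ o hplt]
    have hrowlen : (o.getD (i-1) []).length = m := by
      rw [List.getD_eq_getElem _ _ hplt]
      exact hrows _ (List.getElem_mem hplt)
    congr 1
    rw [List.range'_eq_map_range, List.foldl_map]
    simp only [Nat.add_sub_cancel_left]
    rw [foldl_range_set' _ m _ (by omega)]
    rw [List.drop_of_length_le (by omega), List.append_nil]
    refine List.map_congr_left ?_
    intro t _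
    obtain ⟨i', rfl⟩ : ∃ i', i = i' + 1 := ⟨i - 1, by omega⟩
    simp only [Nat.add_sub_cancel, Nat.add_comm 1 t]
    rfl
  · -- the simplified step preserves the invariant
    intro o i hPo
    obtain ⟨hlen, hrows⟩ := hPo
    refine ⟨by simp [hlen], ?_⟩
    intro r hr
    rcases List.mem_or_eq_of_mem_set hr with h | h
    · exact hrows r h
    · simp [h]

theorem B_char (grid : List (List Int)) :
    largestLocal_alt grid
      = (List.range (grid.length - 2)).map (fun i =>
          (List.range (grid.length - 2)).map (fun j => pvW grid i j)) := by
  unfold largestLocal_alt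
  set n := grid.length with hn
  set f : List Int → List Int := fun row =>
    (List.range (n - 2)).map (fun j =>
      max (max (row.getD j 0) (row.getD (j+1) 0)) (row.getD (j+2) 0)) with hf
  have hrow : ∀ r, r < n → ∀ j, j < n - 2 →
      (((grid.map f).getD r []).getD j 0)
        = max (max (pvAt grid r j) (pvAt grid r (j+1))) (pvAt grid r (j+2)) := by
    intro r hr j hj
    have h1 : (grid.map f).getD r [] = f (grid[r]) := by
      simp [List.getD, List.getElem?_map, List.getElem?_eq_getElem hr]
    rw [h1, hf]
    simp only [pvAt, List.getD, List.getElem?_map, List.getElem?_range hj,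
      Option.map_some, Option.getD_some, List.getElem?_eq_getElem hr]
  refine List.map_congr_left ?_
  intro i hi
  refine List.map_congr_left ?_
  intro j hj
  simp only [List.mem_range] at hi hj
  rw [hrow i (by omega) j hj, hrow (i+1) (by omega) j hj, hrow (i+2) (by omega) j hj]
  unfold pvW
  ac_rfl

-- ===== VERDICT (by name: the statement is the Claim_ definition above) =====
theorem largestLocal_spec : Claim_equal_largestLocal := by
  intro grid _ _
  unfold Spec_largestLocal
  rw [A_char, B_char]
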